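-- pv_equiv track=rewrite | github.com/Qianhao96/CITS-3403 | preferential.py | votes_range
-- ===== SOURCE A (Python) =====
-- def votes_range(votes):
--     """
--     Args:
--         votes (list): a list of votes
--     returns:
--         True if successful, False otherwise.
--     example:
--         votes = [1,2,3,4,5] -> True
--         votes = [1,2,4,5,6] -> False
--     """
--
--     if votes:
--         max_votes = max(votes)+1
--         # 1 -> max in votes
--         for i in range(1,max_votes):
--             if i not in votes: #
--                 return False
--                 break # Informal Votes, No Need To Check
--     return True
-- ===== SOURCE B (Python) =====
-- def votes_range(votes):
--     if not votes:
--         return True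
--     m = max(votes)
--     if m < 1:
--         return True  # range(1, m+1) is empty: nothing to check
--     # the distinct votes in [1, m] cover 1..m exactly when there are m of them
--     return len({v for v in votes if v >= 1}) == m
-- ===== Notes on version B (the rewrite author's own statement) =====
-- stated objective: alternative
-- what changed: Replaces A's per-value membership scan over range(1, max+1) with a single counting pass: the distinct positive votes cover 1..max exactly when there are max of them (pigeonhole), so B compares len(set of positive votes) with max.
import Mathlib
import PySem

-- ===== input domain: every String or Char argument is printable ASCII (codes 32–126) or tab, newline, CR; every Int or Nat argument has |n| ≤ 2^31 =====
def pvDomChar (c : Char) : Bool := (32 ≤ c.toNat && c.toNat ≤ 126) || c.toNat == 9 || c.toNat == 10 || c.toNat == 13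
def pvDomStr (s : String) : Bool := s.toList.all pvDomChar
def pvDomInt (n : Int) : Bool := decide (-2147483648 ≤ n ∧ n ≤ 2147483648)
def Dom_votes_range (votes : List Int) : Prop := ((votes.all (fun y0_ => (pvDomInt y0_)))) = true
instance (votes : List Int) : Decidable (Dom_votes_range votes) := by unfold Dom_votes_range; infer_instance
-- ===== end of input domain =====

-- B replaces A's membership scan over range(1, max+1) with one counting pass:
-- the distinct positive votes cover 1..max exactly when there are max of them.

-- ===== PORT A =====
-- 'for i in range(1, max_votes): if i not in votes: return False' — Python's range
-- is lazy and the loop can return early, so the loop is ported as recursion on the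
-- integer counter i (exact: same i's visited, same early exit).
def votesRangeLoop (votes : List Int) (i maxVotes : Int) : Bool :=
  if i < maxVotes then
    if i ∈ votes then votesRangeLoop votes (i + 1) maxVotes else false
  else true
termination_by (maxVotes - i).toNat
decreasing_by omega

def votes_range (votes : List Int) : Bool :=
  match votes with
  | [] => true                                 -- 'if votes:' falsy → skip loop, return True
  | v :: vs =>
    let maxVotes := vs.foldl max v + 1         -- max(votes) + 1 (Python max of nonempty list)
    votesRangeLoop (v :: vs) 1 maxVotes

-- ===== PORT B =====
def votes_range_alt (votes : List Int) : Bool :=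
  match votes with
  | [] => true
  | v :: vs =>
    let m := vs.foldl max v                    -- max(votes)
    if m < 1 then true
    else -- len({v for v in votes if v >= 1}) == m
      decide (PySem.Set.len (PySem.Set.ofList ((v :: vs).filter (fun x => decide ((1:Int) ≤ x)))) = m)

-- ===== PRECONDITION & SPEC =====
def Spec_votes_range (votes : List Int) (out : Bool) : Prop := out = votes_range_alt votes
instance (votes : List Int) (out : Bool) : Decidable (Spec_votes_range votes out) := by unfold Spec_votes_range; infer_instance

-- ===== CLAIM (what is proved, stated in full; the proofs are below) =====
def Claim_equal_votes_range : Prop := ∀ (votes : List Int), Dom_votes_range votes → Spec_votes_range votes (votes_range votes)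

-- ===== LEMMAS AND PROOFS =====

lemma votesRangeLoop_true_iff (votes : List Int) (M : Int) (n : Nat) :
    ∀ i : Int, (M - i).toNat ≤ n →
    (votesRangeLoop votes i M = true ↔ ∀ j : Int, i ≤ j → j < M → j ∈ votes) := by
  induction n with
  | zero =>
    intro i hn
    rw [votesRangeLoop, if_neg (show ¬ i < M by omega)]
    constructor
    · intro _ j h1 h2; omega
    · intro _; rfl
  | succ n ih =>
    intro i hn
    rw [votesRangeLoop]
    by_cases hlt : i < M
    · rw [if_pos hlt]
      by_cases hmem : i ∈ votes
      · rw [if_pos hmem, ih (i + 1) (by omega)]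
        constructor
        · intro H j h1 h2
          rcases eq_or_lt_of_le h1 with h | h
          · exact h ▸ hmem
          · exact H j (by omega) h2
        · intro H j h1 h2; exact H j (by omega) h2
      · rw [if_neg hmem]
        constructor
        · intro h; exact absurd h (by simp)
        · intro H; exact absurd (H i le_rfl hlt) hmem
    · rw [if_neg hlt]
      constructor
      · intro _ j h1 h2; omega
      · intro _; rfl

lemma le_foldl_max_self (l : List Int) (a : Int) : a ≤ l.foldl max a := by
  induction l generalizing a with
  | nil => simp
  | cons x t ih => exact le_trans (le_max_left a x) (ih (max a x))

lemma le_foldl_max_mem (l : List Int) (a y : Int) (hy : y ∈ l) : y ≤ l.foldl max a := by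
  induction l generalizing a with
  | nil => simp at hy
  | cons x t ih =>
    rcases List.mem_cons.mp hy with h | h
    · exact h ▸ le_trans (le_max_right a y) (le_foldl_max_self t _)
    · exact ih _ h

-- the heart of B: a nodup list of integers from [1, m] has length m iff it contains all of 1..m
lemma perm_iff_of_cover (S : List Int) (m : Int) (hm : 1 ≤ m)
    (hnd : S.Nodup) (hsub : ∀ x ∈ S, 1 ≤ x ∧ x ≤ m) :
    ((∀ j : Int, 1 ≤ j → j ≤ m → j ∈ S) ↔ (S.length : Int) = m) := by
  have hsub' : ∀ x ∈ S, x ∈ PySem.List.pyRange 1 (m + 1) 1 := by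
    intro x hx
    rcases hsub x hx with ⟨h1, h2⟩
    exact PySem.List.mem_pyRange_one.mpr ⟨h1, by omega⟩
  have hlen : ((PySem.List.pyRange 1 (m + 1) 1).length : Int) = m := by
    rw [PySem.List.length_pyRange_one]; omega
  constructor
  · intro H
    have hperm : S.Perm (PySem.List.pyRange 1 (m + 1) 1) := by
      refine (List.perm_ext_iff_of_nodup hnd (PySem.List.nodup_pyRange_one 1 (m + 1))).mpr ?_
      intro x
      constructor
      · exact hsub' x
      · intro hx
        rcases PySem.List.mem_pyRange_one.mp hx with ⟨h1, h2⟩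
        exact H x h1 (by omega)
    rw [hperm.length_eq, hlen]
  · intro H j h1 h2
    have hsp : S.Subperm (PySem.List.pyRange 1 (m + 1) 1) :=
      hnd.subperm hsub'
    have hperm : S.Perm (PySem.List.pyRange 1 (m + 1) 1) := by
      refine hsp.perm_of_length_le ?_
      omega
    exact (hperm.mem_iff).mpr (PySem.List.mem_pyRange_one.mpr ⟨h1, by omega⟩)

-- ===== VERDICT (by name: the statement is the Claim_ definition above) =====
theorem votes_range_spec : Claim_equal_votes_range := by
  intro votes _
  unfold Spec_votes_range
  cases votes with
  | nil => rfl
  | cons v vs =>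
    simp only [votes_range, votes_range_alt]
    set m := vs.foldl max v with hm
    have hmax : ∀ y ∈ v :: vs, y ≤ m := by
      intro y hy
      rcases List.mem_cons.mp hy with h | h
      · exact h ▸ le_foldl_max_self vs v
      · exact le_foldl_max_mem vs v y h
    rw [Bool.eq_iff_iff,
        votesRangeLoop_true_iff (v :: vs) (m + 1) (m + 1 - 1).toNat 1 (by omega)]
    by_cases hm1 : m < 1
    · rw [if_pos hm1]
      constructor
      · intro _; rfl
      · intro _ j h1 h2; omega
    · push Not at hm1
      rw [if_neg (by omega)]
      have hiff := perm_iff_of_cover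
        (PySem.Set.ofList ((v :: vs).filter (fun x => decide ((1:Int) ≤ x)))) m hm1
        (PySem.Set.nodup_ofList _)
        (by
          intro x hx
          rw [PySem.Set.mem_ofList, List.mem_filter] at hx
          refine ⟨by simpa using hx.2, hmax x hx.1⟩)
      rw [decide_eq_true_iff]
      simp only [PySem.Set.len]
      rw [← hiff]
      constructor
      · intro H j h1 h2
        rw [PySem.Set.mem_ofList, List.mem_filter]
        exact ⟨H j h1 (by omega), by simpa using h1⟩
      · intro H j h1 h2
        have := H j h1 (by omega)
        rw [PySem.Set.mem_ofList, List.mem_filter] at this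
        exact this.1
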